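-- pv_equiv track=rewrite | github.com/human02/Interview-Preparation | dsa/arrays/flip_monotonic.py | flipToMonotonic_brute
-- ===== SOURCE A (Python) =====
-- def flipToMonotonic_brute(arr):
--     """
--     Idea:
--     - The idea is to see every index as a split point.
--     - We want to keep 0s on left of the arr and 1s on the right of the split.
--     - We check at each index (a possible split):
--         - The number of 1s in the left of the split
--             - As we will want to flip them
--         - The number of 0s in the right of the split
--             - As we will want to flip them
--         - Sum these 2 counts and track with a minimum_counter.
--     - Minimum count is the answer
--     """
--     n = len(arr)
--
--     # count 1s on the left of split
--     def helper_CountBefore(idx):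
--         result = 0
--         for i in range(idx):
--             if arr[i] == 1:
--                 result += 1
--         return result
--
--     # count 0s on the left of split
--     def helper_CountAfter(idx):
--         result = 0
--         for i in range(idx, n):
--             if arr[i] == 0:
--                 result += 1
--         return result
--
--     minOperation = float("inf")
--     # Last index is also a potential split
--     for i in range(n + 1):
--         leftOnes, rightZeros = 0, 0
--         leftOnes = helper_CountBefore(i)
--         rightZeros = helper_CountAfter(i)
--
--         currOperation = leftOnes + rightZeros
--         minOperation = min(minOperation, currOperation)
--
--     return minOperation
-- ===== SOURCE B (Python) =====
-- def flipToMonotonic_brute(arr):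
--     total_zeros = 0
--     for x in arr:
--         if x == 0:
--             total_zeros += 1
--     best = total_zeros  # split at index 0: no ones on the left, every zero on the right
--     ones = 0
--     zeros = 0
--     for x in arr:
--         if x == 1:
--             ones += 1
--         elif x == 0:
--             zeros += 1
--         cost = ones + (total_zeros - zeros)
--         if cost < best:
--             best = cost
--     return best
-- ===== Notes on version B (the rewrite author's own statement) =====
-- stated objective: faster
-- what changed: Replaced the per-split recount (two inner scans for every split point) by a single pass that maintains running prefix counts of ones and zeros against a precomputed total zero count, taking the minimum cost on the fly.
import Mathlib
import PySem

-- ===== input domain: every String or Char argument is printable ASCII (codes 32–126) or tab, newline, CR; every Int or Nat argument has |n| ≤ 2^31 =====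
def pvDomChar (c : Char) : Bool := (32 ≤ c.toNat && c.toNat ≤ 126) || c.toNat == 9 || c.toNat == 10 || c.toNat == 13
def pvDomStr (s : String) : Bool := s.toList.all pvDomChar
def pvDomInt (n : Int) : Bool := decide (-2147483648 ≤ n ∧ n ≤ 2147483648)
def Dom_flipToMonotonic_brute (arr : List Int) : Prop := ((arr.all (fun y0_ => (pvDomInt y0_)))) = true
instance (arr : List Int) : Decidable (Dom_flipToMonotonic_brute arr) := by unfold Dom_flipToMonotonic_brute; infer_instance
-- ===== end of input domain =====

-- B replaces A's per-split recount by a one-pass prefix-count scan (asymptotically faster; measured).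


-- ===== PORT A =====
-- helper_CountBefore: count 1s in arr[0:idx] by an index loop
def pvCountBefore (arr : List Int) (idx : Int) : Int :=
  (PySem.List.pyRange 0 idx 1).foldl
    (fun result i => if PySem.List.pyGetD arr i 0 = 1 then result + 1 else result) 0

-- helper_CountAfter: count 0s in arr[idx:n] by an index loop
def pvCountAfter (arr : List Int) (idx : Int) : Int :=
  (PySem.List.pyRange idx (arr.length : Int) 1).foldl
    (fun result i => if PySem.List.pyGetD arr i 0 = 0 then result + 1 else result) 0

-- minOperation starts at float("inf"); modeled as Option Int with none = inf (min(inf, x) = x);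
-- range(n+1) is never empty, so the fold always ends in some and the final match is exact.
def flipToMonotonic_brute (arr : List Int) : Int :=
  let n : Int := arr.length
  match (PySem.List.pyRange 0 (n + 1) 1).foldl
      (fun minOperation i =>
        let leftOnes := pvCountBefore arr i
        let rightZeros := pvCountAfter arr i
        let currOperation := leftOnes + rightZeros
        match minOperation with
        | none => some currOperation
        | some v => some (min v currOperation)) none with
  | some v => v
  | none => 0

-- ===== PORT B =====
def flipToMonotonic_brute_alt (arr : List Int) : Int :=
  let totalZeros : Int := arr.foldl (fun s x => if x = 0 then s + 1 else s) 0
  let final := arr.foldl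
    (fun (st : Int × Int × Int) x =>
      let oz : Int × Int :=
        if x = 1 then (st.1 + 1, st.2.1)
        else if x = 0 then (st.1, st.2.1 + 1)
        else (st.1, st.2.1)
      let cost := oz.1 + (totalZeros - oz.2)
      (oz.1, oz.2, if cost < st.2.2 then cost else st.2.2))
    (0, 0, totalZeros)
  final.2.2

-- ===== PRECONDITION & SPEC =====
def Spec_flipToMonotonic_brute (arr : List Int) (out : Int) : Prop := out = flipToMonotonic_brute_alt arr
instance (arr : List Int) (out : Int) : Decidable (Spec_flipToMonotonic_brute arr out) := by unfold Spec_flipToMonotonic_brute; infer_instance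

-- ===== CLAIM (what is proved, stated in full; the proofs are below) =====
def Claim_equal_flipToMonotonic_brute : Prop := ∀ (arr : List Int), Dom_flipToMonotonic_brute arr → Spec_flipToMonotonic_brute arr (flipToMonotonic_brute arr)

-- ===== LEMMAS AND PROOFS =====

def pvC1 (l : List Int) : Int := l.countP (fun x => x == 1)
def pvC0 (l : List Int) : Int := l.countP (fun x => x == 0)
def pvCost (arr : List Int) (k : Nat) : Int := pvC1 (arr.take k) + pvC0 (arr.drop k)

theorem pv_cb (arr : List Int) (k : Nat) (hk : k ≤ arr.length) :
    pvCountBefore arr (k : Int) = pvC1 (arr.take k) := by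
  induction k with
  | zero => simp [pvCountBefore, PySem.List.pyRange_one_eq_nil le_rfl, pvC1]
  | succ k ih =>
    have hk' : k ≤ arr.length := Nat.le_of_succ_le hk
    have hklt : k < arr.length := hk
    have h1 : ((k + 1 : Nat) : Int) = (k : Int) + 1 := by push_cast; ring
    have ihv := ih hk'
    unfold pvCountBefore at ihv ⊢
    rw [h1, PySem.List.pyRange_one_succ_right (Int.natCast_nonneg k), List.foldl_append, ihv]
    simp only [List.foldl_cons, List.foldl_nil, PySem.List.pyGetD_natCast]
    rw [List.getD_eq_getElem arr 0 hklt, List.take_add_one, List.getElem?_eq_getElem hklt]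
    simp only [Option.toList_some]
    by_cases h : arr[k] = 1
    · simp only [pvC1, List.countP_append, List.countP_cons, List.countP_nil, h]
      push_cast
      simp
    · simp only [if_neg h, pvC1, List.countP_append, List.countP_cons, List.countP_nil]
      have hb : (arr[k] == 1) = false := by simp [h]
      rw [hb]
      push_cast
      ring

theorem pv_ca (arr : List Int) (k : Nat) :
    pvCountAfter arr (k : Int) = pvC0 (arr.drop k) := by
  unfold pvCountAfter
  have h := PySem.List.foldl_pyRange_pyGetD' arr 0
      (fun result x => if x = 0 then result + 1 else result) (0 : Int) (Int.natCast_nonneg k)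
  rw [h, Int.toNat_natCast]
  have h2 := PySem.List.foldl_count_if (fun x : Int => x == 0) (arr.drop k) 0
  simp only [beq_iff_eq] at h2
  rw [h2]
  simp [pvC0]

theorem pv_optfold (f : Nat → Int) (l : List Nat) (v : Int) :
    l.foldl (fun m k => match m with
      | none => some (f k)
      | some w => some (min w (f k))) (some v)
      = some (l.foldl (fun w k => min w (f k)) v) := by
  induction l generalizing v with
  | nil => rfl
  | cons x t ih => simp [List.foldl_cons, ih]

theorem pv_A_eq (arr : List Int) :
    flipToMonotonic_brute arr
      = (List.range arr.length).foldl (fun v k => min v (pvCost arr (k + 1))) (pvCost arr 0) := by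
  unfold flipToMonotonic_brute
  dsimp only
  have h1 : ((arr.length : Int)) + 1 = ((arr.length + 1 : Nat) : Int) := by push_cast; ring
  rw [h1, PySem.List.pyRange_zero_nat, List.foldl_map]
  have hcongr : ∀ (m : Option Int) (k : Nat), k ∈ List.range (arr.length + 1) →
      (fun (minOperation : Option Int) (i : Int) =>
        let leftOnes := pvCountBefore arr i
        let rightZeros := pvCountAfter arr i
        let currOperation := leftOnes + rightZeros
        match minOperation with
        | none => some currOperation
        | some v => some (min v currOperation)) m (k : Int)
      = (fun (m : Option Int) (k : Nat) => match m with
        | none => some (pvCost arr k)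
        | some w => some (min w (pvCost arr k))) m k := by
    intro m k hkmem
    have hk : k ≤ arr.length := by
      have := List.mem_range.mp hkmem; omega
    simp only [pv_cb arr k hk, pv_ca arr k, pvCost]
  rw [PySem.List.foldl_congr_mem _ _ _ _ hcongr]
  rw [List.range_succ_eq_map, List.foldl_cons]
  simp only []
  rw [List.foldl_map, pv_optfold]

theorem pv_Binv (arr : List Int) (tz : Int) (htz : tz = pvC0 arr)
    (l p : List Int) (b : Int) (hpl : arr = p ++ l) :
    (l.foldl (fun (st : Int × Int × Int) x =>
      let oz : Int × Int :=
        if x = 1 then (st.1 + 1, st.2.1)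
        else if x = 0 then (st.1, st.2.1 + 1)
        else (st.1, st.2.1)
      let cost := oz.1 + (tz - oz.2)
      (oz.1, oz.2, if cost < st.2.2 then cost else st.2.2)) (pvC1 p, pvC0 p, b)).2.2
      = (List.range l.length).foldl (fun v j => min v (pvCost arr (p.length + j + 1))) b := by
  induction l generalizing p b with
  | nil => simp
  | cons x t ih =>
    have harr : arr = (p ++ [x]) ++ t := by simp [hpl]
    have hcost : pvC1 (p ++ [x]) + (tz - pvC0 (p ++ [x])) = pvCost arr (p.length + 1) := by
      have hlen : p.length + 1 = (p ++ [x]).length := by simp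
      have ht : arr.take (p.length + 1) = p ++ [x] := by
        rw [harr, hlen, List.take_left]
      have hd : arr.drop (p.length + 1) = t := by
        rw [harr, hlen, List.drop_left]
      have hsplit : pvC0 arr = pvC0 (p ++ [x]) + pvC0 t := by
        rw [harr]
        simp only [pvC0, List.countP_append, List.countP_cons, List.countP_nil]
        by_cases hx : x = 0 <;> simp [hx]
      rw [pvCost, ht, hd, htz, hsplit]; ring
    have hstep : ∀ a c : Int, (if c < a then c else a) = min a c := by
      intro a c; rw [min_def]; split_ifs <;> omega
    rw [List.foldl_cons]
    have key : (let oz : Int × Int :=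
          if x = 1 then ((pvC1 p, pvC0 p, b).1 + 1, (pvC1 p, pvC0 p, b).2.1)
          else if x = 0 then ((pvC1 p, pvC0 p, b).1, (pvC1 p, pvC0 p, b).2.1 + 1)
          else ((pvC1 p, pvC0 p, b).1, (pvC1 p, pvC0 p, b).2.1);
        let cost := oz.1 + (tz - oz.2);
        (oz.1, oz.2, if cost < (pvC1 p, pvC0 p, b).2.2 then cost else (pvC1 p, pvC0 p, b).2.2))
        = (pvC1 (p ++ [x]), pvC0 (p ++ [x]), min b (pvCost arr (p.length + 1))) := by
      dsimp only
      by_cases hx1 : x = 1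
      · have e1 : pvC1 (p ++ [x]) = pvC1 p + 1 := by
          simp [pvC1, List.countP_append, hx1]
        have e0 : pvC0 (p ++ [x]) = pvC0 p := by
          simp [pvC0, List.countP_append, hx1]
        rw [if_pos hx1, hstep, ← hcost, e1, e0]
      · by_cases hx0 : x = 0
        · have e1 : pvC1 (p ++ [x]) = pvC1 p := by
            simp [pvC1, List.countP_append, hx0]
          have e0 : pvC0 (p ++ [x]) = pvC0 p + 1 := by
            simp [pvC0, List.countP_append, hx0]
          rw [if_neg hx1, if_pos hx0, hstep, ← hcost, e1, e0]
        · have e1 : pvC1 (p ++ [x]) = pvC1 p := by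
            simp [pvC1, List.countP_append, hx1]
          have e0 : pvC0 (p ++ [x]) = pvC0 p := by
            simp [pvC0, List.countP_append, hx0]
          rw [if_neg hx1, if_neg hx0, hstep, ← hcost, e1, e0]
    rw [key, ih (p ++ [x]) (min b (pvCost arr (p.length + 1))) harr]
    simp only [List.length_cons]
    rw [List.range_succ_eq_map, List.foldl_cons, List.foldl_map]
    have he : ∀ j : Nat, p.length + Nat.succ j + 1 = (p ++ [x]).length + j + 1 := by
      intro j; simp; omega
    simp only [he, Nat.add_zero]

theorem pv_B_eq (arr : List Int) :
    flipToMonotonic_brute_alt arr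
      = (List.range arr.length).foldl (fun v k => min v (pvCost arr (k + 1))) (pvCost arr 0) := by
  unfold flipToMonotonic_brute_alt
  dsimp only
  have htz : arr.foldl (fun s x => if x = 0 then s + 1 else s) 0 = pvC0 arr := by
    have h2 := PySem.List.foldl_count_if (fun x : Int => x == 0) arr 0
    simp only [beq_iff_eq] at h2
    rw [h2]; simp [pvC0]
  rw [htz]
  have hinv := pv_Binv arr (pvC0 arr) rfl arr [] (pvC0 arr) (by simp)
  have e1 : pvC1 ([] : List Int) = 0 := by simp [pvC1]
  have e0 : pvC0 ([] : List Int) = 0 := by simp [pvC0]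
  rw [e1, e0] at hinv
  simp only [List.length_nil, Nat.zero_add] at hinv
  have h0 : pvCost arr 0 = pvC0 arr := by simp [pvCost, pvC1]
  rw [h0]
  exact hinv

-- ===== VERDICT (by name: the statement is the Claim_ definition above) =====
theorem flipToMonotonic_brute_spec : Claim_equal_flipToMonotonic_brute := by
  intro arr _
  unfold Spec_flipToMonotonic_brute
  rw [pv_A_eq, pv_B_eq]
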